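-- pv_equiv track=rewrite | github.com/nickchen111/Leetcode | Daily/4222-count-good-subarrays/count-good-subarrays.py | countGoodSubarrays
-- ===== SOURCE A (Python) =====
-- def countGoodSubarrays(nums: list[int]) -> int:
--     '''
--     OR 只會變大
--     每個位置 判斷一下目前的bit 之前的都包含 然後看包含的範圍到哪
--     越短可能越合法?! 不一定 可以突然出現一個都包含的數字
--     所以應該是去記錄目前這個點位 之前出現的最古早位置在哪
--     感覺很像貢獻法
--     '''
--     last = {}
--     ans = 0
--     or_left = [] # (子樹組or值, 最小左端點)
--
--     for i, x in enumerate(nums):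
--         last[x] = i
--         # 先將原本or_left array加上這次結果
--         for p in or_left:
--             p[0] |= x
--         or_left.append([x, i])
--         # 原地去重
--         idx = 1
--         for j in range(1, len(or_left)):
--             if or_left[j][0] != or_left[j - 1][0]:
--                 or_left[idx] = or_left[j]
--                 idx += 1
--         del or_left[idx:]
--
--         for k, (or_val, left) in enumerate(or_left):
--             right = or_left[k + 1][1] - 1 if k < len(or_left) - 1 else i
--             j = last.get(or_val, -1)
--             if j >= left:
--                 ans += min(right, j) - left + 1
--     return ans
--
--
--
--     '''
--     n = len(nums)
--     L, R = [0] * n, [n - 1] * n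
--     last_bit = [-1] * 31
--     last_val = {}
--     for i, v in enumerate(nums):
--         bound = -1
--         for b in range(31):
--             if not (v & (1 << b)):
--                 bound = max(bound, last_bit[b])
--             else:
--                 last_bit[b] = i
--
--         if v in last_val:
--             bound = max(bound, last_val[v])
--         L[i] = bound + 1
--         last_val[v] = i
--
--     next_bit = [n] * 31
--     for i in range(n - 1, -1, -1):
--         v = nums[i]
--         bound = n
--         for b in range(31):
--             if not (v & (1 << b)):
--                 bound = min(bound, next_bit[b])
--             else:
--                 next_bit[b] = i
--         R[i] = bound - 1
--
--     ans = 0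
--     for i in range(n):
--         ans += (i - L[i] + 1) * (R[i] - i + 1)
--     return ans
--     '''
-- ===== SOURCE B (Python) =====
-- def countGoodSubarrays(nums: list[int]) -> int:
--     # Simpler direct count: a subarray is good iff its bitwise OR occurs
--     # among its elements; check every subarray with a running OR and a
--     # running set of seen values.
--     ans = 0
--     for l in range(len(nums)):
--         cur = 0
--         seen = set()
--         for x in nums[l:]:
--             cur |= x
--             seen.add(x)
--             if cur in seen:
--                 ans += 1
--     return ans
-- ===== Notes on version B (the rewrite author's own statement) =====
-- stated objective: simpler
-- what changed: B drops A's whole machinery (incrementally maintained deduplicated list of (OR-value, min-left-endpoint) segments, in-place dedup pass, last-occurrence dict, clamped per-segment contribution formula) and instead counts directly: for each left endpoint it scans right, keeping a running OR and a set of seen elements, adding 1 whenever the window's OR is among its elements.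
import Mathlib
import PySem

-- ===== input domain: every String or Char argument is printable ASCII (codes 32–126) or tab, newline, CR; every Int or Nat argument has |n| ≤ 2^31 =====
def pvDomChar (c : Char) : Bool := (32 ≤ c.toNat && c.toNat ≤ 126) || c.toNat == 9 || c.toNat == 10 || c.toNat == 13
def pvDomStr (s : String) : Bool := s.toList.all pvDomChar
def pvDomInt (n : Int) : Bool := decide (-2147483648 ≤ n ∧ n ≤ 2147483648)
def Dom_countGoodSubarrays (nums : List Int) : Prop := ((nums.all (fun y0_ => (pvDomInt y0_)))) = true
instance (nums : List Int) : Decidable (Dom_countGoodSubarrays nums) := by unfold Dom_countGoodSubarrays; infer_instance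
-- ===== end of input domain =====

-- B is a simpler direct count (running OR + seen-set per left endpoint) replacing A's
-- deduplicated (OR,left)-segment list with per-segment clamped contributions; equal results, no speed claim.

-- ===== PORT A =====
-- A's in-place adjacent dedup: 'idx = 1; for j in range(1, len(or_left)): …; del or_left[idx:]'
def aDedup (L : List (Int × Int)) : List (Int × Int) :=
  let dd := (PySem.List.pyRange 1 (PySem.List.len L) 1).foldl
    (fun (q : List (Int × Int) × Int) j =>
      if (PySem.List.pyGetD q.1 j (0,0)).1 ≠ (PySem.List.pyGetD q.1 (j-1) (0,0)).1 then
        (PySem.List.pySetD q.1 q.2 (PySem.List.pyGetD q.1 j (0,0)), q.2 + 1)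
      else q) (L, (1:Int))
  PySem.List.slice dd.1 none (some dd.2)

-- A's loop body for 'for i, x in enumerate(nums)'
def aStep (st : PySem.Dict Int Int × Int × List (Int × Int)) (ix : Int × Int) :
    PySem.Dict Int Int × Int × List (Int × Int) :=
  let i := ix.1
  let x := ix.2
  let last := st.1.insert x i
  let ol := aDedup (st.2.2.map (fun p => (PySem.Int.bor p.1 x, p.2)) ++ [(x, i)])
  let ans := (PySem.List.enumerate ol 0).foldl (fun (a : Int) kp =>
      let k := kp.1
      let right := if k < PySem.List.len ol - 1 then (PySem.List.pyGetD ol (k+1) (0,0)).2 - 1 else i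
      let j := last.getD kp.2.1 (-1)
      if j ≥ kp.2.2 then a + (min right j - kp.2.2 + 1) else a) st.2.1
  (last, ans, ol)

def countGoodSubarrays (nums : List Int) : Int :=
  ((PySem.List.enumerate nums 0).foldl aStep (PySem.Dict.empty, (0:Int), ([] : List (Int × Int)))).2.1

-- ===== PORT B =====
-- B's inner loop body: cur |= x; seen.add(x); if cur in seen: ans += 1
def bStep (st : Int × PySem.Set Int × Int) (x : Int) : Int × PySem.Set Int × Int :=
  let cur := PySem.Int.bor st.1 x
  let seen := st.2.1.add x
  (cur, seen, if seen.contains cur then st.2.2 + 1 else st.2.2)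

def countGoodSubarrays_alt (nums : List Int) : Int :=
  (PySem.List.pyRange 0 (PySem.List.len nums) 1).foldl
    (fun ans l => ((PySem.List.slice nums (some l) none).foldl bStep (0, PySem.Set.empty, ans)).2.2) 0

-- ===== PRECONDITION & SPEC =====
def Spec_countGoodSubarrays (nums : List Int) (out : Int) : Prop := out = countGoodSubarrays_alt nums
instance (nums : List Int) (out : Int) : Decidable (Spec_countGoodSubarrays nums out) := by unfold Spec_countGoodSubarrays; infer_instance

-- ===== CLAIM (what is proved, stated in full; the proofs are below) =====
def Claim_equal_countGoodSubarrays : Prop := ∀ (nums : List Int), Dom_countGoodSubarrays nums → Spec_countGoodSubarrays nums (countGoodSubarrays nums)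

-- ===== LEMMAS AND PROOFS =====

-- OR of a list, Python's running 'cur |= x' from 0
def orL (xs : List Int) : Int := xs.foldl PySem.Int.bor 0

-- 0/1 indicator: the window pre[l:] is good (its OR occurs among its elements)
def gInd (pre : List Int) (l : Nat) : Int := if orL (pre.drop l) ∈ pre.drop l then 1 else 0

-- number of good windows ending at the last element? no: all good suffix-windows of pre
def rowCnt (pre : List Int) : Int := ∑ l ∈ Finset.range pre.length, gInd pre l

-- index of the last occurrence of v in pre, -1 if absent
def lastIdx (pre : List Int) (v : Int) : Int :=
  (PySem.List.enumerate pre 0).foldl (fun acc p => if p.2 = v then p.1 else acc) (-1)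

-- functional form of A's adjacent dedup (keep an element iff its first component
-- differs from its original left neighbour's)
def dfGo (prev : Int × Int) : List (Int × Int) → List (Int × Int)
  | [] => []
  | b :: t => if b.1 = prev.1 then dfGo b t else b :: dfGo b t

def dedupF : List (Int × Int) → List (Int × Int)
  | [] => []
  | a :: t => a :: dfGo a t

-- the full (OR of pre[l:], l) list, before dedup
def hfun (pre : List Int) (l : Nat) : Int := orL (pre.drop l)
def Fl (pre : List Int) : List (Int × Int) :=
  (List.range pre.length).map (fun l => (hfun pre l, (l : Int)))
def keptL (pre : List Int) : List Nat :=
  (List.range pre.length).filter (fun l => decide (l = 0) || decide (hfun pre l ≠ hfun pre (l-1)))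

-- recursive form of A's contribution loop over the deduped list
def segSum (i : Int) (J : Int → Int) : List (Int × Int) → Int
  | [] => 0
  | p :: t =>
    (if J p.1 ≥ p.2 then
      min (match t with | [] => i | q :: _ => q.2 - 1) (J p.1) - p.2 + 1 else 0) + segSum i J t

theorem bor_zero_left (x : Int) : PySem.Int.bor 0 x = x := by
  unfold PySem.Int.bor
  rcases x with a | a <;> simp [Int.negSucc_eq] <;> omega

theorem orL_snoc (q : List Int) (x : Int) : orL (q ++ [x]) = PySem.Int.bor (orL q) x := by
  simp [orL, List.foldl_append]

theorem dfGo_congr (p p' : Int × Int) (h : p.1 = p'.1) (t : List (Int × Int)) :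
    dfGo p t = dfGo p' t := by
  cases t with
  | nil => rfl
  | cons b t => simp [dfGo, h]

theorem dfGo_snoc (p b : Int × Int) (t : List (Int × Int)) :
    dfGo p (t ++ [b]) =
      dfGo p t ++ (if b.1 = ((p :: t).getLast (by simp)).1 then [] else [b]) := by
  induction t generalizing p with
  | nil =>
    simp only [List.nil_append, dfGo, List.getLast_singleton]
    split <;> simp
  | cons c t ih =>
    simp only [List.cons_append, dfGo]
    have hlast : ((p :: c :: t).getLast (by simp)) = ((c :: t).getLast (by simp)) := by
      simp [List.getLast_cons]
    rw [hlast]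
    split <;> simp [ih]

theorem dedupF_snoc (Y : List (Int × Int)) (b : Int × Int) (h : Y ≠ []) :
    dedupF (Y ++ [b]) = dedupF Y ++ (if b.1 = (Y.getLast h).1 then [] else [b]) := by
  cases Y with
  | nil => simp at h
  | cons a t =>
    simp only [List.cons_append, dedupF, dfGo_snoc]

theorem take_succ_set (l : List (Int × Int)) (k : Nat) (v : Int × Int) (h : k < l.length) :
    (l.set k v).take (k+1) = l.take k ++ [v] := by
  apply List.ext_getElem
  · simp; omega
  · intro i h1 h2
    simp only [List.getElem_take, List.getElem_set]
    by_cases hik : i = k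
    · subst hik; simp [List.getElem_append_right, List.length_take, Nat.min_eq_left (le_of_lt h)]
    · have hi : i < k := by simp at h1; omega
      rw [List.getElem_append_left (by simp at h1 ⊢; omega)]
      rw [if_neg (by omega)]
      simp [List.getElem_take]

theorem getLast_take (L : List (Int × Int)) (m : Nat) (h : m < L.length) (h2 : L.take (m+1) ≠ []) :
    (L.take (m+1)).getLast h2 = L[m] := by
  rw [List.getLast_eq_getElem]
  simp only [List.getElem_take]
  congr 1
  simp [List.length_take]; omega

theorem aDedup_eq (L : List (Int × Int)) : aDedup L = dedupF L := by
  cases L with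
  | nil => simp [aDedup, dedupF, PySem.List.pyRange_one_eq_nil, PySem.List.slice_to]
  | cons a0 L' =>
  set L := a0 :: L' with hL
  have hn : 1 ≤ L.length := by simp [hL]
  set step : (List (Int × Int) × Int) → Int → (List (Int × Int) × Int) :=
    (fun (q : List (Int × Int) × Int) j =>
      if (PySem.List.pyGetD q.1 j (0,0)).1 ≠ (PySem.List.pyGetD q.1 (j-1) (0,0)).1 then
        (PySem.List.pySetD q.1 q.2 (PySem.List.pyGetD q.1 j (0,0)), q.2 + 1)
      else q) with hstep
  have main : ∀ m : Nat, m ≤ L.length - 1 →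
      ∃ (M : List (Int × Int)) (k : Nat),
        (PySem.List.pyRange 1 (1 + (m:Int)) 1).foldl step (L, (1:Int)) = (M, (k:Int)) ∧
        M.take k = dedupF (L.take (m+1)) ∧ k = (dedupF (L.take (m+1))).length ∧
        M.drop m = L.drop m ∧ M.length = L.length ∧ 1 ≤ k ∧ k ≤ m+1 := by
    intro m
    induction m with
    | zero =>
      intro _
      refine ⟨L, 1, ?_, ?_, ?_, rfl, rfl, le_refl _, le_refl _⟩
      · rw [PySem.List.pyRange_one_eq_nil (by omega)]; rfl
      · simp [hL, dedupF, dfGo]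
      · simp [hL, dedupF, dfGo]
    | succ m ih =>
      intro hm
      obtain ⟨M, k, hfold, htake, hklen, hdrop, hlen, hk1, hkm⟩ := ih (by omega)
      have hmlt : m + 1 < L.length := by omega
      have hrange : PySem.List.pyRange 1 (1 + ((m+1:Nat) :Int)) 1
          = PySem.List.pyRange 1 (1 + (m:Int)) 1 ++ [1 + (m:Int)] := by
        push_cast
        rw [show (1 + ((m:Int)+1)) = (1 + (m:Int)) + 1 by ring]
        exact PySem.List.pyRange_one_succ_right (by omega)
      have hgetj : ∀ t : Nat, m ≤ t → t < L.length → M[t]? = L[t]? := by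
        intro t ht htl
        have := congrArg (fun l => l[t - m]?) hdrop
        simpa [List.getElem?_drop, Nat.add_sub_cancel' ht] using this
      have hMj : PySem.List.pyGetD M ((1:Int) + (m:Int)) (0,0) = L[m+1] := by
        rw [show (1:Int) + (m:Int) = (((m+1:Nat)):Int) by push_cast; ring]
        rw [PySem.List.pyGetD_natCast]
        rw [List.getD_eq_getElem?_getD, hgetj (m+1) (by omega) hmlt]
        simp [List.getElem?_eq_getElem hmlt]
      have hMj1 : PySem.List.pyGetD M ((1:Int) + (m:Int) - 1) (0,0) = L[m] := by
        rw [show (1:Int) + (m:Int) - 1 = ((m:Nat):Int) by push_cast; ring]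
        rw [PySem.List.pyGetD_natCast]
        rw [List.getD_eq_getElem?_getD, hgetj m (by omega) (by omega)]
        simp [List.getElem?_eq_getElem (show m < L.length by omega)]
      have htakeSucc : L.take (m+2) = L.take (m+1) ++ [L[m+1]] := by
        rw [List.take_succ]
        simp [List.getElem?_eq_getElem hmlt]
      have htne : L.take (m+1) ≠ [] := by
        simp [hL]
      have hsnoc := dedupF_snoc (L.take (m+1)) (L[m+1]) htne
      rw [getLast_take L m (by omega) htne] at hsnoc
      rw [hrange, List.foldl_append, hfold]
      simp only [List.foldl_cons, List.foldl_nil]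
      rw [hstep]
      simp only [hMj, hMj1]
      by_cases hcond : (L[m+1]).1 = (L[m]).1
      · rw [if_neg (by simpa using hcond)]
        refine ⟨M, k, rfl, ?_, ?_, ?_, hlen, hk1, by omega⟩
        · rw [htakeSucc, hsnoc, if_pos hcond, List.append_nil, htake]
        · rw [htakeSucc, hsnoc, if_pos hcond, List.append_nil, hklen]
        · have := congrArg (List.drop 1) hdrop
          simpa [List.drop_drop] using this
      · rw [if_pos (by simpa using hcond)]
        have hkltlen : k < M.length := by omega
        refine ⟨M.set k (L[m+1]), k+1, ?_, ?_, ?_, ?_, by simpa using hlen, by omega, by omega⟩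
        · rw [PySem.List.pySetD_natCast]; push_cast; ring_nf
        · rw [take_succ_set M k _ hkltlen, htakeSucc, hsnoc, if_neg hcond, htake]
        · rw [htakeSucc, hsnoc, if_neg hcond]; simp [hklen]
        · apply List.ext_getElem
          · simp; omega
          · intro t h1 h2
            simp only [List.getElem_drop, List.getElem_set]
            by_cases hq : k = m + 1 + t
            · have ht0 : t = 0 ∧ k = m+1 := by omega
              obtain ⟨rfl, rfl⟩ := ht0
              rw [if_pos rfl]
            · rw [if_neg hq]
              have := congrArg (fun l => l[1 + t]?) hdrop
              simp only [List.getElem?_drop] at this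
              have h1' : m + 1 + t < M.length := by simp at h1; omega
              have h2' : m + 1 + t < L.length := by simp at h2; omega
              rw [show m + (1+t) = m+1+t by omega] at this
              simp only [List.getElem?_eq_getElem h1', List.getElem?_eq_getElem h2'] at this
              exact Option.some.inj this
  obtain ⟨M, k, hfold, htake, hklen, _, hlen, hk1, hkm⟩ := main (L.length - 1) le_rfl
  show PySem.List.slice _ none (some _) = _
  have hrw : (1 : Int) + ((L.length - 1 : Nat) : Int) = PySem.List.len L := by
    simp [PySem.List.len_eq]; omega
  rw [← hrw, hfold]
  dsimp only
  rw [PySem.List.slice_to M (b := (k:Int)) (by positivity)]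
  simp only [Int.toNat_natCast]
  rw [htake]
  congr 1
  have : L.length - 1 + 1 = L.length := by omega
  rw [this, List.take_length]

theorem dfGo_map_dfGo (g : Int → Int) (M : List (Int × Int)) :
    ∀ (t : List (Int × Int)) (a p : Int × Int), p.1 = g a.1 →
      dfGo p ((dfGo a t).map (fun r => (g r.1, r.2)) ++ M) =
      dfGo p (t.map (fun r => (g r.1, r.2)) ++ M) := by
  intro t
  induction t with
  | nil => intro a p h; rfl
  | cons b t ih =>
    intro a p h
    by_cases hb : b.1 = a.1
    · rw [show dfGo a (b :: t) = dfGo b t by simp [dfGo, hb]]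
      rw [ih b p (by rw [h, hb])]
      simp only [List.map_cons, List.cons_append, dfGo]
      rw [if_pos (by simp [h, hb])]
      exact (dfGo_congr _ _ (by simp [h, hb]) _).symm
    · rw [show dfGo a (b :: t) = b :: dfGo b t by simp [dfGo, hb]]
      simp only [List.map_cons, List.cons_append, dfGo]
      by_cases hg : g b.1 = p.1
      · rw [if_pos (by simpa using hg), if_pos (by simpa using hg)]
        exact ih b (g b.1, b.2) rfl
      · rw [if_neg (by simpa using hg), if_neg (by simpa using hg)]
        rw [ih b (g b.1, b.2) rfl]

theorem dedupF_map_dedupF (g : Int → Int) (L M : List (Int × Int)) :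
    dedupF ((dedupF L).map (fun r => (g r.1, r.2)) ++ M) =
    dedupF (L.map (fun r => (g r.1, r.2)) ++ M) := by
  cases L with
  | nil => rfl
  | cons a t =>
    simp only [dedupF, List.map_cons, List.cons_append]
    rw [dfGo_map_dfGo g M t a (g a.1, a.2) rfl]
theorem hfun_snoc (pre : List Int) (x : Int) (l : Nat) (h : l < pre.length) :
    hfun (pre ++ [x]) l = PySem.Int.bor (hfun pre l) x := by
  rw [hfun, List.drop_append_of_le_length (le_of_lt h), orL_snoc, hfun]

theorem hfun_last (pre : List Int) (x : Int) :
    hfun (pre ++ [x]) pre.length = x := by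
  rw [hfun, List.drop_append_of_le_length le_rfl]
  simp [orL, bor_zero_left]

theorem Fl_snoc (pre : List Int) (x : Int) :
    Fl (pre ++ [x]) =
      (Fl pre).map (fun p => (PySem.Int.bor p.1 x, p.2)) ++ [(x, (pre.length : Int))] := by
  unfold Fl
  rw [List.map_map]
  simp only [List.length_append, List.length_cons, List.length_nil, Nat.add_zero]
  rw [List.range_succ, List.map_append]
  congr 1
  · apply List.map_congr_left
    intro l hl
    simp only [Function.comp_apply]
    rw [hfun_snoc pre x l (List.mem_range.mp hl)]
  · simp [hfun_last]

theorem dedupF_range_map (h : Nat → Int) (n : Nat) :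
    dedupF ((List.range n).map (fun l => (h l, (l:Int)))) =
      ((List.range n).filter (fun l => decide (l = 0) || decide (h l ≠ h (l-1)))).map
        (fun l => (h l, (l:Int))) := by
  induction n with
  | zero => rfl
  | succ n ih =>
    rw [List.range_succ, List.map_append, List.filter_append]
    simp only [List.map_cons, List.map_nil]
    cases n with
    | zero => simp [dedupF, dfGo]
    | succ m =>
      have hY : (List.range (m+1)).map (fun l => ((h l : Int), (l:Int))) ≠ [] := by
        simp [List.range_succ]
      rw [dedupF_snoc _ _ hY, ih]
      have hlast : (((List.range (m+1)).map (fun l => ((h l : Int), (l:Int)))).getLast hY) =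
          (h m, (m:Int)) := by
        rw [List.getLast_eq_getElem]
        simp
      rw [hlast]
      simp only [List.map_append, List.filter_cons, List.filter_nil]
      congr 1
      by_cases hc : h (m+1) = h m
      · rw [if_pos hc]
        simp [hc]
      · rw [if_neg hc]
        simp [hc]

theorem dedupF_Fl (pre : List Int) :
    dedupF (Fl pre) = (keptL pre).map (fun l => (hfun pre l, (l : Int))) := by
  exact dedupF_range_map (hfun pre) pre.length

theorem lastIdx_nil (v : Int) : lastIdx [] v = -1 := rfl

theorem lastIdx_snoc (pre : List Int) (x v : Int) :
    lastIdx (pre ++ [x]) v = if x = v then (pre.length : Int) else lastIdx pre v := by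
  unfold lastIdx
  rw [PySem.List.enumerate_append, List.foldl_append]
  simp [PySem.List.enumerate_cons, PySem.List.enumerate_nil]

theorem lastIdx_lt_length (pre : List Int) (v : Int) : lastIdx pre v < (pre.length : Int) := by
  induction pre using List.reverseRecOn with
  | nil => simp [lastIdx_nil]
  | append_singleton pre x ih =>
    rw [lastIdx_snoc]
    split <;> simp <;> omega

theorem mem_drop_iff_lastIdx (pre : List Int) (v : Int) :
    ∀ l : Nat, l ≤ pre.length → (v ∈ pre.drop l ↔ (l : Int) ≤ lastIdx pre v) := by
  induction pre using List.reverseRecOn with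
  | nil =>
    intro l hl
    simp [lastIdx_nil]
    omega
  | append_singleton pre x ih =>
    intro l hl
    rw [lastIdx_snoc]
    rcases Nat.lt_or_ge l (pre.length + 1) with hcase | hcase
    · have hle : l ≤ pre.length := by omega
      rw [List.drop_append_of_le_length hle]
      by_cases hx : x = v
      · subst hx
        rw [if_pos rfl]
        constructor
        · intro _; exact_mod_cast Int.ofNat_le.mpr hle
        · intro _; simp
      · rw [if_neg hx]
        rw [List.mem_append]
        constructor
        · rintro (hm | hm)
          · exact (ih l hle).mp hm
          · simp at hm; exact absurd hm.symm hx
        · intro hm; exact Or.inl ((ih l hle).mpr hm)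
    · have : l = pre.length + 1 := by simp at hl; omega
      subst this
      constructor
      · intro hm
        have hnil : (pre ++ [x]).drop (pre.length + 1) = [] := by
          apply List.drop_of_length_le
          simp
        rw [hnil] at hm
        simp at hm
      · intro hm
        exfalso
        have := lastIdx_lt_length (pre ++ [x]) v
        rw [lastIdx_snoc] at this
        split at this <;> (simp at this ⊢; omega)

theorem cntIco (a b : Nat) (J : Int) (hab : a < b) :
    (∑ l ∈ Finset.Ico a b, (if (l : Int) ≤ J then (1:Int) else 0)) =
      if J ≥ (a : Int) then min ((b : Int) - 1) J - a + 1 else 0 := by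
  induction b, hab using Nat.le_induction with
  | base =>
    rw [show Finset.Ico a (a+1) = {a} from by ext t; simp, Finset.sum_singleton]
    split_ifs <;> push_cast <;> omega
  | succ b hb ih =>
    rw [Finset.sum_Ico_succ_top (by omega), ih]
    split_ifs <;> push_cast <;> omega

theorem hconst (h : Nat → Int) (a : Nat) (b : Nat)
    (hrun : ∀ l, a < l → l ≤ b → h l = h (l - 1)) :
    ∀ l, a ≤ l → l ≤ b → h l = h a := by
  intro l hal hlb
  induction l with
  | zero =>
    have : a = 0 := by omega
    subst this; rfl
  | succ l ih =>
    rcases Nat.eq_or_lt_of_le hal with heq | hlt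
    · rw [← heq]
    · have h1 : h (l+1) = h l := by simpa using hrun (l+1) hlt hlb
      rw [h1]
      exact ih (by omega) (by omega)


theorem segSum_eq_count (i : Nat) (h : Nat → Int) (J : Int → Int) :
    ∀ (ks : List Nat) (a : Nat), a ≤ i → ((a :: ks).Pairwise (· < ·)) →
      (∀ l ∈ ks, l ≤ i) →
      (∀ l, a < l → l ≤ i → ((l ∈ a :: ks) ↔ h l ≠ h (l - 1))) →
      segSum (i : Int) J ((a :: ks).map (fun l => (h l, (l : Int)))) =
        ∑ l ∈ Finset.Ico a (i + 1), (if (l : Int) ≤ J (h l) then (1:Int) else 0) := by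
  intro ks
  induction ks with
  | nil =>
    intro a hai _ _ hchar
    have hcst : ∀ l, a ≤ l → l ≤ i → h l = h a := by
      apply hconst
      intro l hal hli
      by_contra hne
      have := (hchar l hal hli).mpr hne
      simp at this
      omega
    rw [Finset.sum_congr rfl (fun l hl => by
      rw [hcst l (Finset.mem_Ico.mp hl).1 (by have := (Finset.mem_Ico.mp hl).2; omega)])]
    rw [cntIco a (i+1) (J (h a)) (by omega)]
    simp only [segSum, List.map_cons, List.map_nil]
    split_ifs <;> push_cast <;> omega
  | cons q t ih =>
    intro a hai hpw hmem hchar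
    have haq : a < q := by
      have := List.pairwise_cons.mp hpw
      exact this.1 q (by simp)
    have hqi : q ≤ i := hmem q (by simp)
    have htgt : ∀ l ∈ t, q < l := by
      have hpw2 := (List.pairwise_cons.mp hpw).2
      exact fun l hl => ((List.pairwise_cons.mp hpw2).1 l hl)
    -- split the sum
    rw [← Finset.sum_Ico_consecutive _ (le_of_lt haq) (by omega)]
    -- first segment
    have hcst : ∀ l, a ≤ l → l ≤ q - 1 → h l = h a := by
      apply hconst
      intro l hal hlq
      by_contra hne
      have hmem' := (hchar l hal (by omega)).mpr hne
      simp at hmem'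
      rcases hmem' with rfl | rfl | hmem'
      · omega
      · omega
      · have := htgt l hmem'; omega
    have hfirst : (∑ l ∈ Finset.Ico a q, (if (l : Int) ≤ J (h l) then (1:Int) else 0)) =
        if J (h a) ≥ (a:Int) then min ((q:Int) - 1) (J (h a)) - a + 1 else 0 := by
      rw [Finset.sum_congr rfl (fun l hl => by
        rw [hcst l (Finset.mem_Ico.mp hl).1 (by have := (Finset.mem_Ico.mp hl).2; omega)])]
      exact cntIco a q (J (h a)) haq
    -- tail via ih
    have htail := ih q hqi (List.pairwise_cons.mp hpw).2 (fun l hl => hmem l (by simp [hl]))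
      (fun l hql hli => by
        rw [← hchar l (by omega) hli]
        constructor
        · intro hm; simp [hm]
        · intro hm
          simp at hm ⊢
          rcases hm with rfl | hm
          · omega
          · tauto)
    simp only [List.map_cons] at htail ⊢
    rw [show segSum (i:Int) J ((h a, (a:Int)) :: (h q, (q:Int)) :: t.map (fun l => (h l, (l:Int)))) =
      (if J (h a) ≥ (a:Int) then min ((q:Int) - 1) (J (h a)) - (a:Int) + 1 else 0) +
        segSum (i:Int) J ((h q, (q:Int)) :: t.map (fun l => (h l, (l:Int)))) from rfl]
    rw [htail, hfirst]


theorem fold_eq_segSum (last : PySem.Dict Int Int) (i : Int) :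
    ∀ (t pre : List (Int × Int)) (a : Int),
      (PySem.List.enumerate t ((pre.length : Nat) : Int)).foldl
        (fun (a : Int) kp =>
          let k := kp.1
          let right := if k < PySem.List.len (pre ++ t) - 1
            then (PySem.List.pyGetD (pre ++ t) (k+1) (0,0)).2 - 1 else i
          let j := last.getD kp.2.1 (-1)
          if j ≥ kp.2.2 then a + (min right j - kp.2.2 + 1) else a) a
      = a + segSum i (fun v => last.getD v (-1)) t := by
  intro t
  induction t with
  | nil => intro pre a; simp [PySem.List.enumerate_nil, segSum]
  | cons p t' ih =>
    intro pre a
    rw [PySem.List.enumerate_cons, List.foldl_cons]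
    have hpre : pre ++ p :: t' = (pre ++ [p]) ++ t' := by simp
    have hstart : (pre.length : Int) + 1 = (((pre ++ [p]).length : Nat) : Int) := by simp
    rw [hpre, hstart, ih (pre ++ [p])]
    dsimp only
    clear ih hpre
    have hR : (if ((pre.length:Int)) < PySem.List.len (pre ++ [p] ++ t') - 1
        then (PySem.List.pyGetD (pre ++ [p] ++ t') ((pre.length:Int)+1) (0,0)).2 - 1 else i)
        = (match t' with | [] => i | q :: _ => q.2 - 1) := by
      cases t' with
      | nil => rw [if_neg (by simp [PySem.List.len_eq])]
      | cons q t'' =>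
        rw [if_pos (by simp [PySem.List.len_eq]; push_cast; omega)]
        rw [hstart, PySem.List.pyGetD_natCast]
        rw [List.getD_eq_getElem?_getD]
        rw [List.getElem?_append_right (le_refl (pre ++ [p]).length)]
        simp
    rw [hR]
    simp only [segSum]
    split <;> ring


theorem b_inner (ys : List Int) :
    ∀ (p : List Int) (a : Int),
      (ys.foldl bStep (orL p, PySem.Set.ofList p, a)).2.2 =
        a + ∑ t ∈ Finset.range ys.length,
          (if orL (p ++ ys.take (t+1)) ∈ p ++ ys.take (t+1) then (1:Int) else 0) := by
  induction ys with
  | nil => intro p a; simp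
  | cons y ys' ih =>
    intro p a
    rw [List.foldl_cons]
    have hstep : bStep (orL p, PySem.Set.ofList p, a) y =
        (orL (p ++ [y]), PySem.Set.ofList (p ++ [y]),
          a + (if orL (p ++ [y]) ∈ p ++ [y] then (1:Int) else 0)) := by
      unfold bStep
      dsimp only
      rw [← orL_snoc, ← PySem.Set.ofList_append_singleton]
      congr 1
      congr 1
      by_cases hm : orL (p ++ [y]) ∈ p ++ [y]
      · rw [if_pos hm]
        rw [if_pos ?_]
        · rw [PySem.Set.contains_iff, PySem.Set.mem_ofList]
          exact hm
      · rw [if_neg hm, if_neg ?_, add_zero]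
        rw [PySem.Set.contains_iff, PySem.Set.mem_ofList]
        exact hm
    rw [hstep, ih (p ++ [y])]
    rw [List.length_cons, Finset.sum_range_succ']
    simp only [List.take_succ_cons, List.take_zero]
    simp only [show ∀ t : Nat, p ++ y :: ys'.take (t+1) = (p ++ [y]) ++ ys'.take (t+1)
      from fun t => by simp]
    ring_nf

theorem list_sum_range (n : Nat) (f : Nat → Int) :
    ((List.range n).map f).sum = ∑ k ∈ Finset.range n, f k := by
  induction n with
  | zero => simp
  | succ n ih => rw [List.range_succ, Finset.sum_range_succ, List.map_append, List.sum_append, ih]; simp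

theorem b_total (nums : List Int) :
    countGoodSubarrays_alt nums =
      ∑ l ∈ Finset.range nums.length, ∑ t ∈ Finset.range (nums.drop l).length,
        (if orL ((nums.drop l).take (t+1)) ∈ (nums.drop l).take (t+1) then (1:Int) else 0) := by
  unfold countGoodSubarrays_alt
  rw [PySem.List.len_eq, PySem.List.pyRange_one]
  simp only [Int.sub_zero, Int.toNat_natCast]
  rw [List.foldl_map]
  have hbody : ∀ (a : Int) (k : Nat), k < nums.length →
      ((PySem.List.slice nums (some ((0:Int) + (k:Int))) none).foldl bStep (0, PySem.Set.empty, a)).2.2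
        = a + ∑ t ∈ Finset.range (nums.drop k).length,
            (if orL ((nums.drop k).take (t+1)) ∈ (nums.drop k).take (t+1) then (1:Int) else 0) := by
    intro a k _
    rw [show ((0:Int) + (k:Int)) = (k:Int) by ring, PySem.List.slice_from_natCast]
    have := b_inner (nums.drop k) [] a
    simpa [orL] using this
  -- replace fold by accumulate-sum
  have main : ∀ (L : List Nat) (a : Int), (∀ k ∈ L, k < nums.length) →
      L.foldl (fun (ans : Int) (k : Nat) =>
        ((PySem.List.slice nums (some ((0:Int) + (k:Int))) none).foldl bStep (0, PySem.Set.empty, ans)).2.2) a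
      = a + (L.map (fun k => ∑ t ∈ Finset.range (nums.drop k).length,
          (if orL ((nums.drop k).take (t+1)) ∈ (nums.drop k).take (t+1) then (1:Int) else 0))).sum := by
    intro L
    induction L with
    | nil => intro a _; simp
    | cons k L' ihL =>
      intro a hmem
      rw [List.foldl_cons, hbody a k (hmem k (by simp)), ihL _ (fun k hk => hmem k (by simp [hk]))]
      simp [add_assoc]
  rw [main (List.range nums.length) 0 (fun k hk => List.mem_range.mp hk)]
  rw [list_sum_range]
  ring

theorem sum_swap_tri (n : Nat) (f : Nat → Nat → Int) :
    (∑ r ∈ Finset.range n, ∑ l ∈ Finset.range (r+1), f l r) =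
      ∑ l ∈ Finset.range n, ∑ r ∈ Finset.Ico l n, f l r := by
  have h1 : ∀ r ∈ Finset.range n, (∑ l ∈ Finset.range (r+1), f l r)
      = ∑ l ∈ Finset.range n, if l ≤ r then f l r else 0 := by
    intro r hr
    rw [← Finset.sum_filter]
    congr 1
    ext l
    simp at hr ⊢
    omega
  rw [Finset.sum_congr rfl h1, Finset.sum_comm]
  apply Finset.sum_congr rfl
  intro l hl
  rw [← Finset.sum_filter]
  congr 1
  ext r
  simp at hl ⊢
  omega
theorem dict_inv_snoc (pre : List Int) (x : Int) (d : PySem.Dict Int Int)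
    (hd : ∀ v, d.getD v (-1) = lastIdx pre v) :
    ∀ v, (d.insert x ((pre.length : Nat) : Int)).getD v (-1) = lastIdx (pre ++ [x]) v := by
  intro v
  rw [PySem.Dict.getD_insert, lastIdx_snoc]
  by_cases hv : v = x
  · subst hv; rw [if_pos rfl, if_pos rfl]
  · rw [if_neg hv, if_neg (fun h => hv h.symm), hd]

theorem keptL_shape (pre : List Int) (n : Nat) (hn : pre.length = n + 1) :
    keptL pre = 0 :: ((List.range n).map Nat.succ).filter
      (fun l => decide (l = 0) || decide (hfun pre l ≠ hfun pre (l-1))) := by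
  unfold keptL
  rw [hn, List.range_succ_eq_map, List.filter_cons]
  simp

theorem mem_keptL (pre : List Int) (l : Nat) :
    l ∈ keptL pre ↔ l < pre.length ∧ (l = 0 ∨ hfun pre l ≠ hfun pre (l-1)) := by
  unfold keptL
  rw [List.mem_filter, List.mem_range]
  simp

theorem pairwise_keptL (pre : List Int) : (keptL pre).Pairwise (· < ·) := by
  exact List.Pairwise.sublist List.filter_sublist List.pairwise_lt_range

theorem rowCnt_lastIdx (pre : List Int) :
    (∑ l ∈ Finset.Ico 0 pre.length, (if (l:Int) ≤ lastIdx pre (hfun pre l) then (1:Int) else 0))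
      = rowCnt pre := by
  rw [show Finset.Ico 0 pre.length = Finset.range pre.length from by
    rw [Finset.range_eq_Ico]]
  unfold rowCnt
  apply Finset.sum_congr rfl
  intro l hl
  rw [gInd]
  have hiff := mem_drop_iff_lastIdx pre (hfun pre l) l (le_of_lt (Finset.mem_range.mp hl))
  exact if_congr hiff.symm rfl rfl

theorem aStep_eq (pre : List Int) (x : Int) (d : PySem.Dict Int Int) (a : Int)
    (hd : ∀ v, d.getD v (-1) = lastIdx pre v) :
    aStep (d, a, dedupF (Fl pre)) (((pre.length : Nat) : Int), x) =
      (d.insert x ((pre.length : Nat) : Int), a + rowCnt (pre ++ [x]), dedupF (Fl (pre ++ [x]))) := by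
  unfold aStep
  dsimp only
  have hol : aDedup ((dedupF (Fl pre)).map (fun p => (PySem.Int.bor p.1 x, p.2))
      ++ [(x, ((pre.length : Nat) : Int))]) = dedupF (Fl (pre ++ [x])) := by
    rw [aDedup_eq, dedupF_map_dedupF (fun y => PySem.Int.bor y x) (Fl pre)
      [(x, ((pre.length : Nat) : Int))], ← Fl_snoc]
  rw [hol]
  congr 1
  congr 1
  -- the contribution fold
  have hf := fold_eq_segSum (d.insert x ((pre.length : Nat) : Int)) ((pre.length : Nat) : Int)
    (dedupF (Fl (pre ++ [x]))) [] a
  simp only [List.nil_append, List.length_nil, Nat.cast_zero] at hf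
  rw [hf]
  have hJ : (fun v => (d.insert x ((pre.length : Nat) : Int)).getD v (-1))
      = fun v => lastIdx (pre ++ [x]) v := funext (dict_inv_snoc pre x d hd)
  rw [hJ]
  rw [dedupF_Fl (pre ++ [x])]
  set pre' := pre ++ [x] with hpre'
  have hlen' : pre'.length = pre.length + 1 := by simp [hpre']
  rw [keptL_shape pre' pre.length hlen']
  have hseg := segSum_eq_count pre.length (hfun pre') (fun v => lastIdx pre' v)
    (((List.range pre.length).map Nat.succ).filter
      (fun l => decide (l = 0) || decide (hfun pre' l ≠ hfun pre' (l-1))))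
    0 (by omega)
    (by rw [← keptL_shape pre' pre.length hlen']; exact pairwise_keptL pre')
    (fun l hl => by
      have hl2 := List.mem_of_mem_filter hl
      simp only [List.mem_map, List.mem_range] at hl2
      obtain ⟨b, hb, rfl⟩ := hl2
      omega)
    (fun l hl0 hli => by
      rw [← keptL_shape pre' pre.length hlen', mem_keptL]
      constructor
      · rintro ⟨_, h0 | hne⟩
        · omega
        · exact hne
      · intro hne
        exact ⟨by omega, Or.inr hne⟩)
  rw [hseg]
  rw [show pre.length + 1 = pre'.length from hlen'.symm]
  rw [rowCnt_lastIdx pre']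

theorem outer_fold (suf : List Int) :
    ∀ (pre : List Int) (d : PySem.Dict Int Int) (a : Int),
      (∀ v, d.getD v (-1) = lastIdx pre v) →
      ∃ d', ((PySem.List.enumerate suf ((pre.length : Nat) : Int)).foldl aStep
          (d, a, dedupF (Fl pre)))
        = (d', a + ∑ r ∈ Finset.range suf.length, rowCnt ((pre ++ suf).take (pre.length + r + 1)),
           dedupF (Fl (pre ++ suf))) := by
  induction suf with
  | nil =>
    intro pre d a hd
    exact ⟨d, by simp [PySem.List.enumerate_nil]⟩
  | cons x suf' ih =>
    intro pre d a hd
    rw [PySem.List.enumerate_cons, List.foldl_cons, aStep_eq pre x d a hd]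
    have hstart : ((pre.length : Nat) : Int) + 1 = (((pre ++ [x]).length : Nat) : Int) := by
      simp
    rw [hstart]
    obtain ⟨d', hfold⟩ := ih (pre ++ [x]) (d.insert x ((pre.length : Nat) : Int))
      (a + rowCnt (pre ++ [x])) (dict_inv_snoc pre x d hd)
    refine ⟨d', ?_⟩
    rw [hfold]
    have hlist : (pre ++ [x]) ++ suf' = pre ++ x :: suf' := by simp
    rw [hlist]
    congr 2
    rw [List.length_cons, Finset.sum_range_succ']
    have h0 : (pre ++ x :: suf').take (pre.length + 0 + 1) = pre ++ [x] := by
      rw [show pre.length + 0 + 1 = (pre ++ [x]).length by simp]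
      rw [show pre ++ x :: suf' = (pre ++ [x]) ++ suf' by simp]
      exact List.take_left
    rw [h0]
    have hterm : ∀ r, (pre ++ x :: suf').take ((pre ++ [x]).length + r + 1)
        = (pre ++ x :: suf').take (pre.length + (r + 1) + 1) := by
      intro r
      congr 1
      simp
      omega
    rw [Finset.sum_congr rfl (fun r _ => by rw [hterm r])]
    ring

theorem a_total (nums : List Int) :
    countGoodSubarrays nums =
      ∑ r ∈ Finset.range nums.length, rowCnt (nums.take (r + 1)) := by
  have hd0 : ∀ v, (PySem.Dict.empty : PySem.Dict Int Int).getD v (-1) = lastIdx [] v := by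
    intro v
    rw [PySem.Dict.getD_empty]
    rfl
  obtain ⟨d', hfold⟩ := outer_fold nums [] PySem.Dict.empty 0 hd0
  simp only [List.nil_append, List.length_nil, Nat.cast_zero, Nat.zero_add] at hfold
  unfold countGoodSubarrays
  rw [show dedupF (Fl []) = ([] : List (Int × Int)) from rfl] at hfold
  rw [hfold]
  simp

-- ===== VERDICT (by name: the statement is the Claim_ definition above) =====
theorem countGoodSubarrays_spec : Claim_equal_countGoodSubarrays := by
  unfold Claim_equal_countGoodSubarrays
  intro nums _
  unfold Spec_countGoodSubarrays
  rw [a_total, b_total]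
  have hrow : ∀ r ∈ Finset.range nums.length,
      rowCnt (nums.take (r+1)) = ∑ l ∈ Finset.range (r+1), gInd (nums.take (r+1)) l := by
    intro r hr
    have hr' := Finset.mem_range.mp hr
    unfold rowCnt
    rw [show (nums.take (r+1)).length = r + 1 from by rw [List.length_take]; omega]
  rw [Finset.sum_congr rfl hrow]
  rw [sum_swap_tri nums.length (fun l r => gInd (nums.take (r+1)) l)]
  apply Finset.sum_congr rfl
  intro l hl
  have hl' : l < nums.length := Finset.mem_range.mp hl
  rw [Finset.sum_Ico_eq_sum_range]
  rw [List.length_drop]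
  apply Finset.sum_congr rfl
  intro t ht
  have ht' : t < nums.length - l := Finset.mem_range.mp ht
  simp only [gInd, hfun]
  have hw : (nums.take (l + t + 1)).drop l = (nums.drop l).take (t+1) := by
    rw [List.drop_take]
    congr 1
    omega
  rw [hw]
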